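-- pv_equiv track=rewrite | github.com/metonline/mgbric | full_dd_automation.py | hand_to_pbn
-- ===== SOURCE A (Python) =====
-- def hand_to_pbn(north, east, south, west, dealer='N'):
--     """Convert hand format to PBN deal string
--
--     Handles empty suits properly for endplay:
--     - Empty suits should be represented as empty string, not '-'
--     - Format: S.H.D.C for each hand
--     """
--     # Clean up hands: replace '-' with empty string
--     def clean_hand(hand_str):
--         if not hand_str:
--             return hand_str
--         parts = hand_str.split('.')
--         return '.'.join(p if p != '-' else '' for p in parts)
--
--     n = clean_hand(north)
--     e = clean_hand(east)
--     s = clean_hand(south)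
--     w = clean_hand(west)
--
--     if dealer == 'N':
--         return f"N:{n} {e} {s} {w}"
--     elif dealer == 'E':
--         return f"E:{e} {s} {w} {n}"
--     elif dealer == 'S':
--         return f"S:{s} {w} {n} {e}"
--     elif dealer == 'W':
--         return f"W:{w} {n} {e} {s}"
--     return f"N:{n} {e} {s} {w}"
-- ===== SOURCE B (Python) =====
-- def hand_to_pbn(north, east, south, west, dealer='N'):
--     """PBN deal string via single-pass char cleaning and recursion on the dealer."""
--     if dealer == 'E':
--         return 'E' + hand_to_pbn(east, south, west, north)[1:]
--     if dealer == 'S':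
--         return 'S' + hand_to_pbn(south, west, north, east)[1:]
--     if dealer == 'W':
--         return 'W' + hand_to_pbn(west, north, east, south)[1:]
--
--     def clean(h):
--         # drop every '-' that forms a whole suit token (delimited by '.' or the ends)
--         out = []
--         at_boundary = True
--         n = len(h)
--         for i, c in enumerate(h):
--             nxt_dot = (i + 1 == n) or h[i + 1] == '.'
--             if not (c == '-' and at_boundary and nxt_dot):
--                 out.append(c)
--             at_boundary = (c == '.')
--         return ''.join(out)
--
--     return 'N:' + ' '.join(clean(h) for h in (north, east, south, west))
-- ===== Notes on version B (the rewrite author's own statement) =====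
-- stated objective: alternative
-- what changed: B cleans each hand in a single character scan with a boundary flag (dropping a '-' whose neighbours are '.' or the string ends) instead of A's split('.')/replace/join token pass, and handles the dealer by recursion (prefix the dealer letter to the tail of the rotated default-dealer call) instead of A's four-way branch with spelled-out orders.
import Mathlib
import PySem

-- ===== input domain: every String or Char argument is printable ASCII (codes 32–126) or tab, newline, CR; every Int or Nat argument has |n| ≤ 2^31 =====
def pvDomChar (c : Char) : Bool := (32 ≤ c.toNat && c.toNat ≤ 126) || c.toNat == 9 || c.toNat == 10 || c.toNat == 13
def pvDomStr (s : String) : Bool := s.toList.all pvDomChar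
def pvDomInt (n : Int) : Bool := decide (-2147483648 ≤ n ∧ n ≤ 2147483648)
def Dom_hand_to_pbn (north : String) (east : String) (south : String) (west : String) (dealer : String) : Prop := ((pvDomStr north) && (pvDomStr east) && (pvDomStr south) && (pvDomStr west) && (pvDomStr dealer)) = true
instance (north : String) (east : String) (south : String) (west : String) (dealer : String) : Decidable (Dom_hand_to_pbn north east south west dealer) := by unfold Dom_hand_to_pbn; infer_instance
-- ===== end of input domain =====

-- B replaces A's token-wise split/join cleaning by a single character scan with a
-- boundary flag, and A's explicit four-way dealer branch by recursion on the dealer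
-- (prefix the dealer letter to the tail of the rotated default call); objective: alternative.

-- ===== PORT A =====
-- A's inner clean_hand: split on '.', replace '-' tokens by '', re-join
def pvCleanHand (h : String) : String :=
  if h = "" then h
  else PySem.Str.join "." (((PySem.Str.split? h ".").getD []).map (fun p => if p = "-" then "" else p))

def hand_to_pbn (north : String) (east : String) (south : String) (west : String) (dealer : String) : String :=
  let n := pvCleanHand north
  let e := pvCleanHand east
  let s := pvCleanHand south
  let w := pvCleanHand west
  if dealer = "N" then "N:" ++ n ++ " " ++ e ++ " " ++ s ++ " " ++ w
  else if dealer = "E" then "E:" ++ e ++ " " ++ s ++ " " ++ w ++ " " ++ n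
  else if dealer = "S" then "S:" ++ s ++ " " ++ w ++ " " ++ n ++ " " ++ e
  else if dealer = "W" then "W:" ++ w ++ " " ++ n ++ " " ++ e ++ " " ++ s
  else "N:" ++ n ++ " " ++ e ++ " " ++ s ++ " " ++ w

-- ===== PORT B =====
-- B's clean: one pass over the characters carrying an at-boundary flag; a '-' is
-- dropped iff the previous char is '.' (or the start) and the next is '.' (or the end)
def pvCleanGo (atBoundary : Bool) : List Char → List Char
  | [] => []
  | c :: rest =>
    if c = '-' ∧ atBoundary = true ∧ rest.head?.getD '.' = '.' then pvCleanGo (c == '.') rest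
    else c :: pvCleanGo (c == '.') rest

def pvCleanB (h : String) : String := String.ofList (pvCleanGo true h.toList)

def hand_to_pbn_alt (north : String) (east : String) (south : String) (west : String) (dealer : String) : String :=
  if dealer = "E" then
    "E" ++ PySem.Str.slice (hand_to_pbn_alt east south west north "N") (some 1) none
  else if dealer = "S" then
    "S" ++ PySem.Str.slice (hand_to_pbn_alt south west north east "N") (some 1) none
  else if dealer = "W" then
    "W" ++ PySem.Str.slice (hand_to_pbn_alt west north east south "N") (some 1) none
  else
    "N:" ++ PySem.Str.join " " ([north, east, south, west].map pvCleanB)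
termination_by (if dealer = "E" ∨ dealer = "S" ∨ dealer = "W" then 1 else 0 : Nat)
decreasing_by all_goals simp_all

-- ===== PRECONDITION & SPEC =====
def Spec_hand_to_pbn (north : String) (east : String) (south : String) (west : String) (dealer : String) (out : String) : Prop := out = hand_to_pbn_alt north east south west dealer
instance (north : String) (east : String) (south : String) (west : String) (dealer : String) (out : String) : Decidable (Spec_hand_to_pbn north east south west dealer out) := by unfold Spec_hand_to_pbn; infer_instance

-- ===== CLAIM (what is proved, stated in full; the proofs are below) =====
def Claim_equal_hand_to_pbn : Prop := ∀ (north : String) (east : String) (south : String) (west : String) (dealer : String), Dom_hand_to_pbn north east south west dealer → Spec_hand_to_pbn north east south west dealer (hand_to_pbn north east south west dealer)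

-- ===== LEMMAS AND PROOFS =====

-- proof-only reference splitter: splitOn with sep "." without fuel/accumulators
def pvSplit (pre : List Char) : List Char → List (List Char)
  | [] => [pre]
  | c :: rest => if c = '.' then pre :: pvSplit [] rest else pvSplit (pre ++ [c]) rest

-- A's token replacement, on char lists
def pvRepl (p : List Char) : List Char := if p = ['-'] then [] else p

lemma pvSplit_ne_nil (l pre : List Char) : pvSplit pre l ≠ [] := by
  induction l generalizing pre with
  | nil => simp [pvSplit]
  | cons c rest ih => by_cases hc : c = '.' <;> simp [pvSplit, hc, ih]

lemma pv_join_cons (x : List Char) (ps : List (List Char)) (h : ps ≠ []) :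
    PySem.Chars.join ['.'] (x :: ps) = x ++ '.' :: PySem.Chars.join ['.'] ps := by
  cases ps with
  | nil => exact absurd rfl h
  | cons y ys => simp [PySem.Chars.join, List.intercalate]

lemma pv_go_eq : ∀ (fuel : Nat) (l cur : List Char) (acc : List (List Char)), l.length ≤ fuel →
    PySem.Chars.splitOn.go ['.'] fuel l cur acc = acc.reverse ++ pvSplit cur.reverse l := by
  intro fuel
  induction fuel with
  | zero =>
    intro l cur acc h
    have hl : l = [] := by cases l <;> simp_all
    subst hl
    simp [PySem.Chars.splitOn.go, pvSplit]
  | succ m ih =>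
    intro l cur acc h
    cases l with
    | nil => simp [PySem.Chars.splitOn.go, pvSplit]
    | cons c rest =>
      by_cases hc : c = '.'
      · subst hc
        rw [PySem.Chars.splitOn.go, if_pos (by simp [List.isPrefixOf])]
        have hd : List.drop ['.'].length ('.' :: rest) = rest := rfl
        rw [hd, ih rest [] (cur.reverse :: acc) (by simp at h; omega)]
        simp [pvSplit]
      · rw [PySem.Chars.splitOn.go,
            if_neg (by simp [List.isPrefixOf]; exact fun hh => hc hh.symm)]
        rw [ih rest (c :: cur) acc (by simp at h; omega)]
        simp [pvSplit, hc]

lemma pv_splitOn_eq (l : List Char) : PySem.Chars.splitOn l ['.'] = pvSplit [] l := by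
  rw [PySem.Chars.splitOn, pv_go_eq (l.length + 1) l [] [] (by omega)]
  rfl

lemma pvCleanGo_boundary (rest : List Char) (h : rest.head?.getD '.' = '.') :
    pvCleanGo false rest = pvCleanGo true rest := by
  cases rest with
  | nil => rfl
  | cons c r =>
    have hc : c = '.' := by simpa using h
    subst hc
    simp [pvCleanGo]

-- key program-specific fact: A's token-level replacement equals B's boundary scan
lemma pv_clean_core : ∀ (l pre : List Char), ('.' ∉ pre) → (pre = ['-'] → l.head?.getD '.' ≠ '.') →
    PySem.Chars.join ['.'] ((pvSplit pre l).map pvRepl) = pre ++ pvCleanGo pre.isEmpty l := by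
  intro l
  induction l with
  | nil =>
    intro pre _ hinv
    have hne : pre ≠ ['-'] := fun h => (hinv h) rfl
    simp [pvSplit, pvRepl, hne, PySem.Chars.join, List.intercalate, pvCleanGo]
  | cons c rest ih =>
    intro pre hdot hinv
    by_cases hc : c = '.'
    · subst hc
      have hne : pre ≠ ['-'] := fun h => (hinv h) (by simp)
      have hih := ih [] (by simp) (by simp)
      rw [show pvSplit pre ('.' :: rest) = pre :: pvSplit [] rest from by simp [pvSplit]]
      simp only [List.map_cons]
      rw [pv_join_cons _ _ (by simp [pvSplit_ne_nil]), hih]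
      simp [pvRepl, hne, pvCleanGo]
    · by_cases hdrop : c = '-' ∧ pre.isEmpty = true ∧ rest.head?.getD '.' = '.'
      · obtain ⟨hcm, hpre, hnext⟩ := hdrop
        subst hcm
        have hpre' : pre = [] := by simpa using hpre
        subst hpre'
        have hih := ih [] (by simp) (by simp)
        simp only [List.nil_append, List.isEmpty_nil] at hih ⊢
        have hgoalR : pvCleanGo true ('-' :: rest) = pvCleanGo true rest := by
          rw [show pvCleanGo true ('-' :: rest) = pvCleanGo false rest from by
                simp [pvCleanGo, hnext]]
          exact pvCleanGo_boundary rest hnext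
        rw [hgoalR]
        rw [show pvSplit [] ('-' :: rest) = pvSplit ['-'] rest from by simp [pvSplit, hc]]
        cases rest with
        | nil => simp [pvSplit, pvRepl, PySem.Chars.join, List.intercalate, pvCleanGo]
        | cons c2 r2 =>
          have hc2 : c2 = '.' := by simpa using hnext
          subst hc2
          rw [show pvSplit ['-'] ('.' :: r2) = ['-'] :: pvSplit [] r2 from by simp [pvSplit]]
          rw [show pvSplit [] ('.' :: r2) = [] :: pvSplit [] r2 from by simp [pvSplit]] at hih
          simp only [List.map_cons] at hih ⊢
          rw [pv_join_cons _ _ (by simp [pvSplit_ne_nil])] at hih ⊢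
          simpa [pvRepl] using hih
      · have hih := ih (pre ++ [c]) (by simp; exact ⟨hdot, fun hh => hc hh.symm⟩)
          (by intro hp hhead
              have : pre = [] ∧ c = '-' := by
                cases pre with
                | nil => simpa using hp
                | cons a as =>
                  exact absurd (congrArg List.length hp) (by simp)
              exact hdrop ⟨this.2, by simp [this.1], hhead⟩)
        rw [show pvSplit pre (c :: rest) = pvSplit (pre ++ [c]) rest from by simp [pvSplit, hc]]
        rw [hih]
        have hstep : pvCleanGo pre.isEmpty (c :: rest) = c :: pvCleanGo false rest := by
          simp only [pvCleanGo]
          rw [if_neg hdrop, show (c == '.') = false from by simp [hc]]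
        rw [hstep, show (pre ++ [c]).isEmpty = false from by simp]
        simp
-- string-level: B's clean equals A's clean_hand
lemma pv_cleanB_eq (h : String) : pvCleanB h = pvCleanHand h := by
  unfold pvCleanB pvCleanHand
  by_cases he : h = ""
  · subst he; rfl
  · rw [if_neg he, ← String.toList_inj]
    have hsplit : PySem.Str.split? h "." =
        some ((pvSplit [] h.toList).map String.ofList) := by
      simp [PySem.Str.split?, PySem.Chars.split?, pv_splitOn_eq]
    rw [hsplit]
    simp only [Option.getD_some, List.map_map]
    have hmap : ((pvSplit [] h.toList).map ((fun p => if p = "-" then "" else p) ∘ String.ofList))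
        = (pvSplit [] h.toList).map (fun t => String.ofList (pvRepl t)) := by
      apply List.map_congr_left
      intro t _
      simp only [Function.comp, pvRepl]
      by_cases ht : t = ['-']
      · subst ht; simp
      · rw [if_neg ht, if_neg (by intro hh; exact ht (by simpa using congrArg String.toList hh))]
    rw [hmap]
    rw [PySem.Str.toList_join]
    simp only [List.map_map]
    have : (pvSplit [] h.toList).map (String.toList ∘ fun t => String.ofList (pvRepl t))
        = (pvSplit [] h.toList).map pvRepl := by
      apply List.map_congr_left; intro t _; simp [Function.comp]
    rw [this]
    have := pv_clean_core h.toList [] (by simp) (by simp)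
    simpa using this.symm

-- ===== VERDICT (by name: the statement is the Claim_ definition above) =====
theorem hand_to_pbn_spec : Claim_equal_hand_to_pbn := by
  intro north east south west dealer _
  unfold Spec_hand_to_pbn hand_to_pbn
  by_cases h1 : dealer = "N"
  · subst h1
    rw [hand_to_pbn_alt]
    simp only [String.reduceEq, reduceIte]
    rw [← String.toList_inj]
    simp [pv_cleanB_eq, PySem.Str.toList_join, PySem.Chars.join, List.intercalate]
  · by_cases h2 : dealer = "E"
    · subst h2
      rw [hand_to_pbn_alt]
      simp only [String.reduceEq, reduceIte]
      rw [hand_to_pbn_alt]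
      simp only [String.reduceEq, reduceIte]
      rw [← String.toList_inj]
      simp [pv_cleanB_eq, PySem.Str.toList_join, PySem.Str.toList_slice, PySem.Chars.slice,
        PySem.List.slice_from_one, PySem.Chars.join, List.intercalate]
    · by_cases h3 : dealer = "S"
      · subst h3
        rw [hand_to_pbn_alt]
        simp only [String.reduceEq, reduceIte]
        rw [hand_to_pbn_alt]
        simp only [String.reduceEq, reduceIte]
        rw [← String.toList_inj]
        simp [pv_cleanB_eq, PySem.Str.toList_join, PySem.Str.toList_slice, PySem.Chars.slice,
          PySem.List.slice_from_one, PySem.Chars.join, List.intercalate]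
      · by_cases h4 : dealer = "W"
        · subst h4
          rw [hand_to_pbn_alt]
          simp only [String.reduceEq, reduceIte]
          rw [hand_to_pbn_alt]
          simp only [String.reduceEq, reduceIte]
          rw [← String.toList_inj]
          simp [pv_cleanB_eq, PySem.Str.toList_join, PySem.Str.toList_slice, PySem.Chars.slice,
            PySem.List.slice_from_one, PySem.Chars.join, List.intercalate]
        · rw [hand_to_pbn_alt]
          simp only [if_neg h1, if_neg h2, if_neg h3, if_neg h4]
          rw [← String.toList_inj]
          simp [pv_cleanB_eq, PySem.Str.toList_join, PySem.Chars.join, List.intercalate]
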